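-- pv_equiv track=rewrite | github.com/jettero/jstat | jstat/util.py | seconds_to_interval
-- ===== SOURCE A (Python) =====
-- def seconds_to_interval(x):
--     conv = {"y": (365 * 86400), "d": 86400, "h": 3600, "m": 60}
--     ret = ""
--     for unit, uc in conv.items():
--         v, x = divmod(x, uc)
--         if v:
--             ret += f"{v}{unit}"
--     if x:
--         ret += f"{x}s"
--     return ret
-- ===== SOURCE B (Python) =====
-- def seconds_to_interval(x):
--     # Recurse from the smallest unit upward: peel off x % base, carry x // base
--     # to the next larger unit, and build the string back-to-front by prepending.
--     def go(x, units):
--         if not units: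
--             return f"{x}y" if x else ""
--         base, u = units[0]
--         part = f"{x % base}{u}" if x % base else ""
--         return go(x // base, units[1:]) + part
--     return go(x, [(60, "s"), (60, "m"), (24, "h"), (365, "d")])
-- ===== Notes on version B (the rewrite author's own statement) =====
-- stated objective: alternative
-- what changed: B replaces A's largest-unit-first loop that threads a divmod remainder and appends to an accumulator with a recursion that starts from the smallest unit, peels off x % base, carries x // base up to the next larger unit, and builds the string back-to-front by prepending the larger-unit prefix returned by the recursive call.
import Mathlib
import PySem

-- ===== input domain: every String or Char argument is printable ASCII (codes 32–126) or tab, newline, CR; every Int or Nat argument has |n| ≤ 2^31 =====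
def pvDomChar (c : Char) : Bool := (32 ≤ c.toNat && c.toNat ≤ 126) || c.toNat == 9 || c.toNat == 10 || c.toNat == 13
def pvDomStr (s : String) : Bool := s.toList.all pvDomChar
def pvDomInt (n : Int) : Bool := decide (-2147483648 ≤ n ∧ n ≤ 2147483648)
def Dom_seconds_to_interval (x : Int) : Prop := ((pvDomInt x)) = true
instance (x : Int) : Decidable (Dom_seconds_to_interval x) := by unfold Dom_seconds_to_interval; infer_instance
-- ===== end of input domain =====

-- B recurses from the smallest unit upward (mod first, carry the quotient up), building
-- the string back-to-front, instead of A's largest-first remainder-threading loop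
-- (objective: alternative decomposition).

-- ===== PORT A =====
def seconds_to_interval (x : Int) : String :=
  let conv : List (String × Int) := [("y", 365 * 86400), ("d", 86400), ("h", 3600), ("m", 60)]
  let st := conv.foldl (fun (st : String × Int) (p : String × Int) =>
      let v := PySem.Int.floordiv st.2 p.2
      let r := PySem.Int.mod st.2 p.2
      (if v ≠ 0 then st.1 ++ PySem.Int.toStr v ++ p.1 else st.1, r)) ("", x)
  if st.2 ≠ 0 then st.1 ++ PySem.Int.toStr st.2 ++ "s" else st.1

-- ===== PORT B =====
def stiGo (x : Int) : List (Int × String) → String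
  | [] => if x ≠ 0 then PySem.Int.toStr x ++ "y" else ""
  | (base, u) :: rest =>
      let v := PySem.Int.mod x base
      let part := if v ≠ 0 then PySem.Int.toStr v ++ u else ""
      stiGo (PySem.Int.floordiv x base) rest ++ part

def seconds_to_interval_alt (x : Int) : String :=
  stiGo x [(60, "s"), (60, "m"), (24, "h"), (365, "d")]

-- ===== PRECONDITION & SPEC =====
def Spec_seconds_to_interval (x : Int) (out : String) : Prop := out = seconds_to_interval_alt x
instance (x : Int) (out : String) : Decidable (Spec_seconds_to_interval x out) := by unfold Spec_seconds_to_interval; infer_instance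

-- ===== CLAIM (what is proved, stated in full; the proofs are below) =====
def Claim_equal_seconds_to_interval : Prop := ∀ (x : Int), Dom_seconds_to_interval x → Spec_seconds_to_interval x (seconds_to_interval x)

-- ===== LEMMAS AND PROOFS =====

-- ===== VERDICT (by name: the statement is the Claim_ definition above) =====
theorem seconds_to_interval_spec : Claim_equal_seconds_to_interval := by
  intro x _
  unfold Spec_seconds_to_interval seconds_to_interval seconds_to_interval_alt
  have fd : ∀ (a b : Int), 0 < b → PySem.Int.floordiv a b = a / b := by
    intro a b hb; exact PySem.Int.floordiv_eq_ediv_of_pos hb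
  have md : ∀ (a b : Int), 0 < b → PySem.Int.mod a b = a % b := by
    intro a b hb; exact PySem.Int.mod_eq_emod_of_pos hb
  simp only [List.foldl, stiGo,
    fd _ (365*86400) (by norm_num), md _ (365*86400) (by norm_num),
    fd _ 86400 (by norm_num), md _ 86400 (by norm_num),
    fd _ 3600 (by norm_num), md _ 3600 (by norm_num),
    fd _ 60 (by norm_num), md _ 60 (by norm_num),
    fd _ 24 (by norm_num), md _ 24 (by norm_num),
    fd _ 365 (by norm_num), md _ 365 (by norm_num)]
  norm_num
  -- bridge A's remainder-threaded components to B's quotient-carried components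
  have e0 : x / 60 / 60 = x / 3600 := by omega
  have e1 : x / 3600 / 24 = x / 86400 := by omega
  have e2 : x / 86400 / 365 = x / 31536000 := by omega
  have f1 : x % 31536000 / 86400 = x / 86400 % 365 := by omega
  have f2 : x % 86400 / 3600 = x / 3600 % 24 := by omega
  have f3 : x % 3600 / 60 = x / 60 % 60 := by omega
  simp only [e0, e1, e2, f1, f2, f3, Int.dvd_iff_emod_eq_zero]
  by_cases h1 : x / 31536000 = 0 <;> by_cases h2 : x / 86400 % 365 = 0 <;>
    by_cases h3 : x / 3600 % 24 = 0 <;> by_cases h4 : x / 60 % 60 = 0 <;>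
    by_cases h5 : x % 60 = 0 <;>
    simp [h1, h2, h3, h4, h5, String.append_assoc]
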